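-- pv_equiv track=rewrite | github.com/Gihoon-Kim-Git/PPDS24F-Daily-Code | week08/23/prob1.py | max_ropes_greater_than_k
-- ===== SOURCE A (Python) =====
-- def max_ropes_greater_than_k(K, A):
--     count = 0
--     length = 0
--     for rope in A:
--         length += rope # add length with the previous one.
--         if length >= K:
--             count += 1
--             length = 0
--     return count
-- ===== SOURCE B (Python) =====
-- def max_ropes_greater_than_k(K, A):
--     # Stage 1: global prefix sums (never reset).
--     prefix = []
--     s = 0
--     for x in A:
--         s += x
--         prefix.append(s)
--     # Stage 2: walk the prefix sums with a moving threshold: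
--     # a segment ends at the first prefix sum p with p >= target,
--     # and the next threshold becomes p + K.
--     count = 0
--     target = K
--     for p in prefix:
--         if p >= target:
--             count += 1
--             target = p + K
--     return count
-- ===== Notes on version B (the rewrite author's own statement) =====
-- stated objective: alternative
-- what changed: Replaces the resetting accumulator with two staged passes: first build the global prefix-sum list, then count crossings of a moving threshold (target = prefix sum at the last cut + K), so no per-segment sum is ever maintained or reset.
import Mathlib
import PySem

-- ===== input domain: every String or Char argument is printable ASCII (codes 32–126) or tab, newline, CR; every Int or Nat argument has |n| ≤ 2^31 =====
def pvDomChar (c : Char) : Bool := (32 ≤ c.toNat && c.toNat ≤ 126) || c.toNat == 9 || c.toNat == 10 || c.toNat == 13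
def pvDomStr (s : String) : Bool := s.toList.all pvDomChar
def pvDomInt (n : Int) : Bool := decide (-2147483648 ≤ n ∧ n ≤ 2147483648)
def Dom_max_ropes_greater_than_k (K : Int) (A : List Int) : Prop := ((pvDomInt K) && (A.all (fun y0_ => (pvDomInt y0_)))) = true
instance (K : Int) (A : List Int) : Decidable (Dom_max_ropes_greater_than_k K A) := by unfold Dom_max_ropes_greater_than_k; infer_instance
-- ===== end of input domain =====

-- B replaces A's resetting accumulator by two staged passes: build global prefix sums, then count crossings of a moving threshold; alternative decomposition, same cost.


-- ===== PORT A =====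
-- flat loop over A carrying (count, length); reset length on reaching K
def max_ropes_greater_than_k (K : Int) (A : List Int) : Int :=
  (A.foldl (fun (st : Int × Int) rope =>
      let length := st.2 + rope
      if length ≥ K then (st.1 + 1, (0 : Int)) else (st.1, length)) (0, 0)).1

-- ===== PORT B =====
-- stage 1: the loop building the global prefix-sum list (state: running sum, list built by append)
def mrPrefix (A : List Int) : List Int :=
  (A.foldl (fun (st : Int × List Int) x => (st.1 + x, st.2 ++ [st.1 + x])) (0, [])).2

-- stage 2: walk the prefix sums with a moving threshold (state: count, target)
def max_ropes_greater_than_k_alt (K : Int) (A : List Int) : Int :=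
  ((mrPrefix A).foldl (fun (st : Int × Int) p =>
      if p ≥ st.2 then (st.1 + 1, p + K) else st) (0, K)).1

-- ===== PRECONDITION & SPEC =====
def Spec_max_ropes_greater_than_k (K : Int) (A : List Int) (out : Int) : Prop := out = max_ropes_greater_than_k_alt K A
instance (K : Int) (A : List Int) (out : Int) : Decidable (Spec_max_ropes_greater_than_k K A out) := by unfold Spec_max_ropes_greater_than_k; infer_instance

-- ===== CLAIM (what is proved, stated in full; the proofs are below) =====
def Claim_equal_max_ropes_greater_than_k : Prop := ∀ (K : Int) (A : List Int), Dom_max_ropes_greater_than_k K A → Spec_max_ropes_greater_than_k K A (max_ropes_greater_than_k K A)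

-- ===== LEMMAS AND PROOFS =====

-- A's and B's step functions, named for the lemmas
def mrStepA (K : Int) (st : Int × Int) (rope : Int) : Int × Int :=
  let length := st.2 + rope
  if length ≥ K then (st.1 + 1, (0 : Int)) else (st.1, length)

def mrStepB (K : Int) (st : Int × Int) (p : Int) : Int × Int :=
  if p ≥ st.2 then (st.1 + 1, p + K) else st

-- structural description of the prefix-sum list
def mrPre (s : Int) : List Int → List Int
  | [] => []
  | x :: xs => (s + x) :: mrPre (s + x) xs

theorem mrPrefix_fold : ∀ (A : List Int) (s : Int) (acc : List Int),
    (A.foldl (fun (st : Int × List Int) x => (st.1 + x, st.2 ++ [st.1 + x])) (s, acc)).2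
      = acc ++ mrPre s A := by
  intro A
  induction A with
  | nil => intro s acc; simp [mrPre]
  | cons x xs ih => intro s acc; simp [List.foldl, mrPre, ih]

-- invariant linking A's (count, length) state at running prefix sum s to
-- B's (count, target) state with target = s - length + K
theorem mrMain (K : Int) : ∀ (A : List Int) (c len s : Int),
    (A.foldl (mrStepA K) (c, len)).1 = ((mrPre s A).foldl (mrStepB K) (c, s - len + K)).1 := by
  intro A
  induction A with
  | nil => intro c len s; simp [mrPre]
  | cons x xs ih =>
    intro c len s
    simp only [List.foldl, mrPre, mrStepA, mrStepB]
    by_cases h : len + x ≥ K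
    · rw [if_pos h, if_pos (show s + x ≥ s - len + K by omega)]
      have := ih (c + 1) 0 (s + x)
      simpa using this
    · rw [if_neg h, if_neg (show ¬ s + x ≥ s - len + K by omega)]
      have := ih c (len + x) (s + x)
      have e : s + x - (len + x) + K = s - len + K := by ring
      rw [e] at this
      exact this

-- ===== VERDICT (by name: the statement is the Claim_ definition above) =====
theorem max_ropes_greater_than_k_spec : Claim_equal_max_ropes_greater_than_k := by
  intro K A _
  show max_ropes_greater_than_k K A = max_ropes_greater_than_k_alt K A
  unfold max_ropes_greater_than_k max_ropes_greater_than_k_alt mrPrefix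
  rw [mrPrefix_fold A 0 []]
  simpa [mrStepA, mrStepB] using mrMain K A 0 0 0
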